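-- pv_equiv track=rewrite | github.com/SAY-5/datafinder | datafinder/router.py | _has_metadata_keywords
-- ===== SOURCE A (Python) =====
-- def _has_metadata_keywords(text: str) -> bool:
--     """Cheap detector for words that map directly to metadata cols."""
--     keywords = (
--         "mri", "ct ", "x-ray", "ultrasound", "pet", "histology",
--         "fundus", "oct ", "eeg", "ecg",
--         "knee", "lung", "brain", "heart", "spine", "retina",
--         "subjects", "patients", "participants",
--         "annotation", "label", "annotated",
--     )
--     return any(k in text for k in keywords)
-- ===== SOURCE B (Python) =====
-- def _has_metadata_keywords(text: str) -> bool: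
--     """Cheap detector for words that map directly to metadata cols."""
--     kws = ("mri|ct |x-ray|ultrasound|pet|histology|fundus|oct |eeg|ecg|"
--            "knee|lung|brain|heart|spine|retina|subjects|patients|"
--            "participants|annotation|label|annotated").split("|")
--     index = {}
--     for k in kws:
--         index.setdefault(k[0], []).append(k)
--     for i in range(len(text)):
--         for k in index.get(text[i], ()):
--             if text.startswith(k, i):
--                 return True
--     return False
-- ===== Notes on version B (the rewrite author's own statement) =====
-- stated objective: alternative
-- what changed: A runs 22 independent whole-text substring scans, one per keyword; B stores the keywords as a single pipe-joined string split once, builds a first-character index (dict from head character to its keywords), and makes one left-to-right pass over text positions, testing only keywords whose head character matches the current one.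
import Mathlib
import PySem

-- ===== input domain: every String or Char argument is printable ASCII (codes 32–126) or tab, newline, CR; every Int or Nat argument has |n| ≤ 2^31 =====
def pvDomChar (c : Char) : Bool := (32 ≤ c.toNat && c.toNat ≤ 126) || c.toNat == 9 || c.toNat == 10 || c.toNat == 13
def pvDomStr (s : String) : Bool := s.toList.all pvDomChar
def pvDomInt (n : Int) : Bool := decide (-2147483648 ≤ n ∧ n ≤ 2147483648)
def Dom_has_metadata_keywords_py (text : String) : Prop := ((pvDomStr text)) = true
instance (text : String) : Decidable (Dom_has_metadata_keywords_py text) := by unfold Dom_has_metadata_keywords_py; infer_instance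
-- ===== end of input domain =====

-- B keeps the keywords as one '|'-joined string split once, builds a first-character index, and
-- scans the text in a single left-to-right pass (objective: alternative traversal; not faster).

-- ===== PORT A =====
-- any(k in text for k in keywords)
def has_metadata_keywords_py (text : String) : Bool :=
  ["mri", "ct ", "x-ray", "ultrasound", "pet", "histology",
   "fundus", "oct ", "eeg", "ecg",
   "knee", "lung", "brain", "heart", "spine", "retina",
   "subjects", "patients", "participants",
   "annotation", "label", "annotated"].any (fun k => PySem.Str.isIn k text)

-- ===== PORT B =====
-- kws = "mri|ct |…|annotated".split("|")   (split? is total here: the separator "|" is nonempty)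
def pvKwsB : List String :=
  (PySem.Str.split? "mri|ct |x-ray|ultrasound|pet|histology|fundus|oct |eeg|ecg|knee|lung|brain|heart|spine|retina|subjects|patients|participants|annotation|label|annotated" "|").getD []

-- index = {}; for k in kws: index.setdefault(k[0], []).append(k)
-- (setdefault+append on key k[0] = Dict.modify (k[0]) [] (· ++ [k]); k[0] via pyGet?)
def pvIndexB : PySem.Dict Char (List String) :=
  pvKwsB.foldl
    (fun d k =>
      match PySem.Str.pyGet? k 0 with
      | some c => d.modify c [] (fun l => l ++ [k])
      | none => d)
    PySem.Dict.empty

-- for i in range(len(text)): for k in index.get(text[i], ()): if text.startswith(k, i): return True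
-- (scan over suffixes of text; text.startswith(k, i) = k.toList.isPrefixOf (drop i))
def pvScanB : List Char → Bool
  | [] => false
  | c :: rest =>
      ((pvIndexB.getD c []).any (fun k => k.toList.isPrefixOf (c :: rest))) || pvScanB rest

def has_metadata_keywords_py_alt (text : String) : Bool :=
  pvScanB text.toList

-- ===== PRECONDITION & SPEC =====
def Spec_has_metadata_keywords_py (text : String) (out : Bool) : Prop := out = has_metadata_keywords_py_alt text
instance (text : String) (out : Bool) : Decidable (Spec_has_metadata_keywords_py text out) := by unfold Spec_has_metadata_keywords_py; infer_instance

-- ===== CLAIM (what is proved, stated in full; the proofs are below) =====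
def Claim_equal_has_metadata_keywords_py : Prop := ∀ (text : String), Dom_has_metadata_keywords_py text → Spec_has_metadata_keywords_py text (has_metadata_keywords_py text)

-- ===== LEMMAS AND PROOFS =====

-- proof-side name for A's keyword tuple
def pvKW : List String :=
  ["mri", "ct ", "x-ray", "ultrasound", "pet", "histology",
   "fundus", "oct ", "eeg", "ecg",
   "knee", "lung", "brain", "heart", "spine", "retina",
   "subjects", "patients", "participants",
   "annotation", "label", "annotated"]

-- B's split of the joined string recovers exactly A's tuple
set_option maxRecDepth 100000 in
theorem pvKwsB_eq : pvKwsB = pvKW := by decide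

theorem pv_kw_ne_nil : ∀ k ∈ pvKW, k.toList ≠ [] := by decide

-- the index lookup at c tests exactly the keywords that can match at a position holding c
theorem pv_step (c : Char) (rest : List Char) :
    ((pvIndexB.getD c []).any (fun k => k.toList.isPrefixOf (c :: rest)))
      = (pvKW.any (fun k => k.toList.isPrefixOf (c :: rest))) := by
  by_cases h1 : c = 'm'; · subst h1; simp [pvIndexB, pvKwsB_eq, pvKW, List.isPrefixOf, PySem.Dict.getD_modify, PySem.Dict.getD_empty]
  by_cases h2 : c = 'c'; · subst h2; simp [pvIndexB, pvKwsB_eq, pvKW, List.isPrefixOf, PySem.Dict.getD_modify, PySem.Dict.getD_empty]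
  by_cases h3 : c = 'x'; · subst h3; simp [pvIndexB, pvKwsB_eq, pvKW, List.isPrefixOf, PySem.Dict.getD_modify, PySem.Dict.getD_empty]
  by_cases h4 : c = 'u'; · subst h4; simp [pvIndexB, pvKwsB_eq, pvKW, List.isPrefixOf, PySem.Dict.getD_modify, PySem.Dict.getD_empty]
  by_cases h5 : c = 'p'; · subst h5; simp [pvIndexB, pvKwsB_eq, pvKW, List.isPrefixOf, PySem.Dict.getD_modify, PySem.Dict.getD_empty]
  by_cases h6 : c = 'h'; · subst h6; simp [pvIndexB, pvKwsB_eq, pvKW, List.isPrefixOf, PySem.Dict.getD_modify, PySem.Dict.getD_empty]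
  by_cases h7 : c = 'f'; · subst h7; simp [pvIndexB, pvKwsB_eq, pvKW, List.isPrefixOf, PySem.Dict.getD_modify, PySem.Dict.getD_empty]
  by_cases h8 : c = 'o'; · subst h8; simp [pvIndexB, pvKwsB_eq, pvKW, List.isPrefixOf, PySem.Dict.getD_modify, PySem.Dict.getD_empty]
  by_cases h9 : c = 'e'; · subst h9; simp [pvIndexB, pvKwsB_eq, pvKW, List.isPrefixOf, PySem.Dict.getD_modify, PySem.Dict.getD_empty]
  by_cases h10 : c = 'k'; · subst h10; simp [pvIndexB, pvKwsB_eq, pvKW, List.isPrefixOf, PySem.Dict.getD_modify, PySem.Dict.getD_empty]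
  by_cases h11 : c = 'l'; · subst h11; simp [pvIndexB, pvKwsB_eq, pvKW, List.isPrefixOf, PySem.Dict.getD_modify, PySem.Dict.getD_empty]
  by_cases h12 : c = 'b'; · subst h12; simp [pvIndexB, pvKwsB_eq, pvKW, List.isPrefixOf, PySem.Dict.getD_modify, PySem.Dict.getD_empty]
  by_cases h13 : c = 's'; · subst h13; simp [pvIndexB, pvKwsB_eq, pvKW, List.isPrefixOf, PySem.Dict.getD_modify, PySem.Dict.getD_empty]
  by_cases h14 : c = 'r'; · subst h14; simp [pvIndexB, pvKwsB_eq, pvKW, List.isPrefixOf, PySem.Dict.getD_modify, PySem.Dict.getD_empty]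
  by_cases h15 : c = 'a'; · subst h15; simp [pvIndexB, pvKwsB_eq, pvKW, List.isPrefixOf, PySem.Dict.getD_modify, PySem.Dict.getD_empty]
  simp [pvIndexB, pvKwsB_eq, pvKW, List.isPrefixOf, PySem.Dict.getD_modify, PySem.Dict.getD_empty,
    h1, h2, h3, h4, h5, h6, h7, h8, h9, h10, h11, h12, h13, h14, h15]
  exact ⟨fun h => absurd h.symm h1, fun h => absurd h.symm h2, fun h => absurd h.symm h3,
    fun h => absurd h.symm h4, fun h => absurd h.symm h5, fun h => absurd h.symm h6,
    fun h => absurd h.symm h7, fun h => absurd h.symm h8, fun h => absurd h.symm h9,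
    fun h => absurd h.symm h9, fun h => absurd h.symm h10, fun h => absurd h.symm h11,
    fun h => absurd h.symm h12, fun h => absurd h.symm h6, fun h => absurd h.symm h13,
    fun h => absurd h.symm h14, fun h => absurd h.symm h13, fun h => absurd h.symm h5,
    fun h => absurd h.symm h5, fun h => absurd h.symm h15, fun h => absurd h.symm h11,
    fun h => absurd h.symm h15⟩

theorem pv_scan_iff (cs : List Char) :
    pvScanB cs = true ↔ ∃ k ∈ pvKW, k.toList <:+: cs := by
  induction cs with
  | nil =>
    simp only [pvScanB]
    constructor
    · intro h; cases h
    · rintro ⟨k, hk, hi⟩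
      exact absurd (List.infix_nil.mp hi) (pv_kw_ne_nil k hk)
  | cons c rest ih =>
    simp only [pvScanB, Bool.or_eq_true, pv_step, List.any_eq_true, ih]
    constructor
    · rintro (⟨k, hk, hp⟩ | ⟨k, hk, hi⟩)
      · exact ⟨k, hk, (List.infix_cons_iff).2 (Or.inl (List.isPrefixOf_iff_prefix.mp hp))⟩
      · exact ⟨k, hk, (List.infix_cons_iff).2 (Or.inr hi)⟩
    · rintro ⟨k, hk, hi⟩
      rcases (List.infix_cons_iff).1 hi with hp | hi'
      · exact Or.inl ⟨k, hk, List.isPrefixOf_iff_prefix.mpr hp⟩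
      · exact Or.inr ⟨k, hk, hi'⟩

-- ===== VERDICT (by name: the statement is the Claim_ definition above) =====
theorem has_metadata_keywords_py_spec : Claim_equal_has_metadata_keywords_py := by
  intro text _
  unfold Spec_has_metadata_keywords_py
  rw [Bool.eq_iff_iff]
  unfold has_metadata_keywords_py has_metadata_keywords_py_alt
  rw [pv_scan_iff, List.any_eq_true]
  constructor
  · rintro ⟨k, hk, hin⟩
    exact ⟨k, hk, (PySem.Str.isIn_iff_infix k text).1 hin⟩
  · rintro ⟨k, hk, hi⟩
    exact ⟨k, hk, (PySem.Str.isIn_iff_infix k text).2 hi⟩
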